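-- pv_equiv track=rewrite | github.com/BramDevlaminck/DiscreteAlgorithmsCombinatorialGeneration | permutations.py | perm_lex_unrank
-- ===== SOURCE A (Python) =====
-- import math
--
-- def perm_lex_unrank(n: int, rank: int) -> list[int]:
--     """Algorithm 2.16"""
--
--     permutation = [0 for _ in range(n)]
--     permutation[-1] = 1
--
--     for j in range(1, n):
--         j_faculty = math.factorial(j)
--         d = (rank % (j_faculty * (j + 1))) // j_faculty
--         rank -= d * j_faculty
--         permutation[n - j - 1] = d + 1
--         for i in range(n - j, n):
--             if permutation[i] > d:
--                 permutation[i] += 1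
--
--     return permutation
-- ===== SOURCE B (Python) =====
-- import math
--
--
-- def perm_lex_unrank(n: int, rank: int) -> list[int]:
--     """Factorial-number-system unranking: extract all factoradic digits of
--     rank by repeated divmod, then build the permutation left-to-right by
--     popping the chosen remaining value from a candidate list."""
--     r = rank % math.factorial(n)
--     digits = [0] * n          # digits[0] is the most significant digit
--     for j in range(2, n + 1):
--         r, digits[n - j] = divmod(r, j)
--     avail = list(range(1, n + 1))
--     return [avail.pop(d) for d in digits]
-- ===== Notes on version B (the rewrite author's own statement) =====
-- stated objective: faster
-- what changed: A recomputes math.factorial(j) and does floor-div/mod by factorial-sized moduli at every step and relabels the whole suffix after each prepend; B reduces rank mod n! once, peels all factoradic digits with a single divmod chain by 2..n, and builds the permutation left-to-right by popping the chosen value from a list of remaining candidates.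
import Mathlib
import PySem

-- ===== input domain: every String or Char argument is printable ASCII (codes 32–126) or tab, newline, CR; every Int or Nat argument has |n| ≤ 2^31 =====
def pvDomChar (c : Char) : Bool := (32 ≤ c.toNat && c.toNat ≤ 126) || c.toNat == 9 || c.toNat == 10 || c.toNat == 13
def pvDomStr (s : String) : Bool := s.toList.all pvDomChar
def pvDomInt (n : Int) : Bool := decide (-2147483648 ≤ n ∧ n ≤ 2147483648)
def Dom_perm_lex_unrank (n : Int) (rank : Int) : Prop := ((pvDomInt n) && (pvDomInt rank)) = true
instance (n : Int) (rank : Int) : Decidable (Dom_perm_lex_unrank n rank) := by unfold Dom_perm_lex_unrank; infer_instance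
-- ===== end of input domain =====

-- B replaces A's per-step factorial recomputation and big-modulus arithmetic
-- by one reduction mod n! and a divmod chain, and the suffix relabelling by
-- popping from a candidate list (objective: faster, measured by the check).

-- math.factorial(j); exact for j ≥ 0 (the only arguments the ports reach)
def pyFactorial (j : Int) : Int := ((j.toNat.factorial : Nat) : Int)

-- ===== PORT A =====
-- Python list read/write xs[i] on an Array carrier: same index rule as
-- PySem.List.pyGetD/pySetD (exact; see bridge lemmas pvArrGetD_eq/pvArrSetD_eq)
def pyArrGetD (a : Array Int) (i : Int) (d : Int) : Int :=
  match PySem.List.pyIdx? a.size i with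
  | some k => (a[k]?).getD d
  | none => d

def pyArrSetD (a : Array Int) (i : Int) (v : Int) : Array Int :=
  match PySem.List.pyIdx? a.size i with
  | some k => a.setIfInBounds k v
  | none => a

-- body of A's 'for j in range(1, n)' loop; state = (rank, permutation)
def permAStep (n : Int) (st : Int × Array Int) (j : Int) : Int × Array Int :=
  let jfac := pyFactorial j
  let d := PySem.Int.floordiv (PySem.Int.mod st.1 (jfac * (j + 1))) jfac
  let rank' := st.1 - d * jfac
  let perm := pyArrSetD st.2 (n - j - 1) (d + 1)
  -- for i in range(n - j, n): if permutation[i] > d: permutation[i] += 1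
  let perm := (PySem.List.pyRange (n - j) n 1).foldl
    (fun p i =>
      if pyArrGetD p i 0 > d then
        pyArrSetD p i (pyArrGetD p i 0 + 1)
      else p) perm
  (rank', perm)

def perm_lex_unrank (n : Int) (rank : Int) : List Int :=
  -- permutation = [0 for _ in range(n)]; permutation[-1] = 1
  let permutation : Array Int := ((PySem.List.pyRange 0 n 1).map (fun _ => 0)).toArray
  let permutation := pyArrSetD permutation (-1) 1
  ((PySem.List.pyRange 1 n 1).foldl (permAStep n) (rank, permutation)).2.toList

-- ===== PORT B =====
-- body of B's 'for j in range(2, n+1)' divmod loop; state = (r, digits)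
def permBDigitStep (n : Int) (st : Int × List Int) (j : Int) : Int × List Int :=
  (PySem.Int.floordiv st.1 j, PySem.List.pySetD st.2 (n - j) (PySem.Int.mod st.1 j))

-- body of B's '[avail.pop(d) for d in digits]'; state = (avail, out)
def permBPopStep (st : List Int × List Int) (d : Int) : List Int × List Int :=
  match PySem.List.pop? st.1 d with
  | some (v, rest) => (rest, st.2 ++ [v])
  | none => st   -- unreachable on Pre_: every digit is a valid index

def perm_lex_unrank_alt (n : Int) (rank : Int) : List Int :=
  -- r = rank % math.factorial(n)
  let r : Int := PySem.Int.mod rank (pyFactorial n)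
  -- digits = [0] * n;  for j in range(2, n+1): r, digits[n-j] = divmod(r, j)
  let st := (PySem.List.pyRange 2 (n + 1) 1).foldl (permBDigitStep n)
    (r, List.replicate n.toNat 0)
  -- avail = list(range(1, n+1)); return [avail.pop(d) for d in digits]
  (st.2.foldl permBPopStep (PySem.List.pyRange 1 (n + 1) 1, [])).2

-- ===== PRECONDITION & SPEC =====
-- A raises IndexError (permutation[-1] on the empty list) whenever n ≤ 0.
def Pre_perm_lex_unrank (n : Int) (rank : Int) : Prop := 1 ≤ n
instance (n : Int) (rank : Int) : Decidable (Pre_perm_lex_unrank n rank) := by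
  unfold Pre_perm_lex_unrank; infer_instance
def pvWitness_perm_lex_unrank : Int × Int := (4, 10)

def Spec_perm_lex_unrank (n : Int) (rank : Int) (out : List Int) : Prop := out = perm_lex_unrank_alt n rank
instance (n : Int) (rank : Int) (out : List Int) : Decidable (Spec_perm_lex_unrank n rank out) := by unfold Spec_perm_lex_unrank; infer_instance

-- ===== CLAIM (what is proved, stated in full; the proofs are below) =====
def Claim_equal_perm_lex_unrank : Prop := ∀ (n : Int) (rank : Int), Dom_perm_lex_unrank n rank → Pre_perm_lex_unrank n rank → Spec_perm_lex_unrank n rank (perm_lex_unrank n rank)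

-- ===== LEMMAS AND PROOFS =====

-- list-level restatement of A's loop body, and the Array ↔ List bridge

def pvAStepL (n : Int) (st : Int × List Int) (j : Int) : Int × List Int :=
  let jfac := pyFactorial j
  let d := PySem.Int.floordiv (PySem.Int.mod st.1 (jfac * (j + 1))) jfac
  let rank' := st.1 - d * jfac
  let perm := PySem.List.pySetD st.2 (n - j - 1) (d + 1)
  let perm := (PySem.List.pyRange (n - j) n 1).foldl
    (fun p i =>
      if PySem.List.pyGetD p i 0 > d then
        PySem.List.pySetD p i (PySem.List.pyGetD p i 0 + 1)
      else p) perm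
  (rank', perm)

theorem pvArrGetD_eq (a : Array Int) (i d : Int) :
    pyArrGetD a i d = PySem.List.pyGetD a.toList i d := by
  unfold pyArrGetD PySem.List.pyGetD PySem.List.pyGet?
  rw [Array.length_toList]
  cases h : PySem.List.pyIdx? a.size i with
  | none => simp [h]
  | some k => simp [h, ← Array.getElem?_toList, List.getD_eq_getElem?_getD]

theorem pvArrSetD_eq (a : Array Int) (i v : Int) :
    (pyArrSetD a i v).toList = PySem.List.pySetD a.toList i v := by
  unfold pyArrSetD PySem.List.pySetD PySem.List.pySet?
  rw [Array.length_toList]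
  cases h : PySem.List.pyIdx? a.size i with
  | none => simp [h]
  | some k => simp [h, Array.toList_setIfInBounds]

theorem pv_inner_bridge (d : Int) (is : List Int) :
    ∀ a : Array Int,
      (is.foldl
        (fun p i =>
          if pyArrGetD p i 0 > d then pyArrSetD p i (pyArrGetD p i 0 + 1) else p) a).toList
      = is.foldl
          (fun p i =>
            if PySem.List.pyGetD p i 0 > d then
              PySem.List.pySetD p i (PySem.List.pyGetD p i 0 + 1)
            else p) a.toList := by
  induction is with
  | nil => intro a; rfl
  | cons i is ih =>
    intro a
    simp only [List.foldl_cons]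
    rw [show PySem.List.pyGetD a.toList i 0 = pyArrGetD a i 0 from (pvArrGetD_eq a i 0).symm,
        show PySem.List.pySetD a.toList i (pyArrGetD a i 0 + 1)
            = (pyArrSetD a i (pyArrGetD a i 0 + 1)).toList from (pvArrSetD_eq a i _).symm]
    split_ifs with hc
    · exact ih _
    · exact ih a

theorem pv_A_bridge (n : Int) (js : List Int) :
    ∀ (r : Int) (a : Array Int),
      ((js.foldl (permAStep n) (r, a)).1 = (js.foldl (pvAStepL n) (r, a.toList)).1)
      ∧ ((js.foldl (permAStep n) (r, a)).2.toList = (js.foldl (pvAStepL n) (r, a.toList)).2) := by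
  induction js with
  | nil => intro r a; exact ⟨rfl, rfl⟩
  | cons j js ih =>
    intro r a
    simp only [List.foldl_cons]
    have hstep1 : (permAStep n (r, a) j).1 = (pvAStepL n (r, a.toList) j).1 := by
      simp [permAStep, pvAStepL]
    have hstep2 : (permAStep n (r, a) j).2.toList = (pvAStepL n (r, a.toList) j).2 := by
      simp only [permAStep, pvAStepL]
      rw [pv_inner_bridge, pvArrSetD_eq]
    have hpair : pvAStepL n (r, a.toList) j
        = ((permAStep n (r, a) j).1, (permAStep n (r, a) j).2.toList) := by
      rw [hstep1, hstep2]
    rw [hpair]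
    exact ih _ _

-- Common abstract description of both programs' result: the factoradic
-- digits of rank, and the permutation they denote (built back-to-front,
-- prepending d+1 and bumping every larger entry of the suffix).

def pvBump (d x : Int) : Int := if x > d then x + 1 else x

def pvG : List Int → List Int
  | [] => [1]
  | d :: ds => (d + 1) :: (pvG ds).map (pvBump d)

def pvFct (k : Nat) : Int := (k.factorial : Nat)

def pvDg (rank : Int) (k : Nat) : Int := (rank % pvFct (k + 1)) / pvFct k

def pvDs (rank : Int) : Nat → List Int
  | 0 => []
  | m + 1 => pvDg rank (m + 1) :: pvDs rank m

theorem pvFct_pos (k : Nat) : 0 < pvFct k := by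
  unfold pvFct; exact_mod_cast k.factorial_pos

theorem pvFct_succ (k : Nat) : pvFct (k + 1) = pvFct k * ((k : Int) + 1) := by
  unfold pvFct
  push_cast [Nat.factorial_succ]
  ring

theorem pyFactorial_natCast (k : Nat) : pyFactorial (k : Int) = pvFct k := by
  simp [pyFactorial, pvFct]

theorem length_pvG (ds : List Int) : (pvG ds).length = ds.length + 1 := by
  induction ds with
  | nil => rfl
  | cons d ds ih => simp [pvG, ih]

theorem length_pvDs (rank : Int) (m : Nat) : (pvDs rank m).length = m := by
  induction m with
  | zero => rfl
  | succ m ih => simp [pvDs, ih]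

theorem pv_set_mid (K : Nat) (S : List Int) (v : Int) :
    (List.replicate (K + 1) (0 : Int) ++ S).set K v
      = List.replicate K (0 : Int) ++ v :: S := by
  rw [List.replicate_succ', List.append_assoc, List.set_append]
  simp

theorem pv_getD_mid (pre : List Int) (x : Int) (S : List Int) :
    PySem.List.pyGetD (pre ++ x :: S) (pre.length : Int) 0 = x := by
  rw [PySem.List.pyGetD_natCast]
  simp [List.getD_append_right]

theorem pv_inner_fold (d : Int) :
    ∀ (S pre : List Int),
      (PySem.List.pyRange (pre.length : Int) ((pre.length : Int) + S.length) 1).foldl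
        (fun p i =>
          if PySem.List.pyGetD p i 0 > d then
            PySem.List.pySetD p i (PySem.List.pyGetD p i 0 + 1)
          else p) (pre ++ S)
      = pre ++ S.map (pvBump d) := by
  intro S
  induction S with
  | nil => intro pre; simp [PySem.List.pyRange_one_eq_nil]
  | cons x S ih =>
    intro pre
    rw [PySem.List.pyRange_one_cons (by push_cast [List.length_cons]; omega)]
    simp only [List.foldl_cons]
    have hstep :
        (if PySem.List.pyGetD (pre ++ x :: S) (pre.length : Int) 0 > d then
            PySem.List.pySetD (pre ++ x :: S) (pre.length : Int)
              (PySem.List.pyGetD (pre ++ x :: S) (pre.length : Int) 0 + 1)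
          else pre ++ x :: S)
        = (pre ++ [pvBump d x]) ++ S := by
      rw [pv_getD_mid, PySem.List.pySetD_natCast]
      by_cases hx : x > d
      · simp only [hx, if_pos, pvBump]
        rw [List.set_append]
        simp
      · simp only [hx, if_neg, pvBump, if_false, ite_false]
        simp
    rw [hstep]
    have hlen : ((pre ++ [pvBump d x]).length : Int) = (pre.length : Int) + 1 := by
      simp
    have hrange : PySem.List.pyRange ((pre.length : Int) + 1)
        ((pre.length : Int) + ((x :: S).length : Int)) 1
        = PySem.List.pyRange ((pre ++ [pvBump d x]).length : Int)
            (((pre ++ [pvBump d x]).length : Int) + (S.length : Int)) 1 := by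
      rw [hlen]; congr 1; push_cast [List.length_cons]; ring
    rw [hrange, ih (pre ++ [pvBump d x])]
    simp

theorem pv_digit_step (rank : Int) (m : Nat) :
    PySem.Int.floordiv
        (PySem.Int.mod (rank - rank % pvFct (m + 1)) (pvFct (m + 1) * (((m : Int) + 1) + 1)))
        (pvFct (m + 1))
      = pvDg rank (m + 1) := by
  have hF : 0 < pvFct (m + 1) := pvFct_pos _
  have hG : pvFct (m + 1) * (((m : Int) + 1) + 1) = pvFct (m + 2) := by
    rw [pvFct_succ (m + 1)]; push_cast; ring
  rw [hG]
  have hGpos : 0 < pvFct (m + 2) := pvFct_pos _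
  rw [PySem.Int.mod_eq_emod_of_pos hGpos, PySem.Int.floordiv_eq_ediv_of_pos hF]
  have hdvd : pvFct (m + 1) ∣ pvFct (m + 2) := by
    rw [pvFct_succ (m + 1)]; exact dvd_mul_right _ _
  set X := rank % pvFct (m + 2) with hX
  set Y := rank % pvFct (m + 1) with hY
  have hYX : X % pvFct (m + 1) = Y := by
    rw [hX, hY, Int.emod_emod_of_dvd _ hdvd]
  have hX0 : 0 ≤ X := Int.emod_nonneg _ (by omega)
  have hXlt : X < pvFct (m + 2) := Int.emod_lt_of_pos _ hGpos
  have hY0 : 0 ≤ Y := Int.emod_nonneg _ (by omega)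
  have hYlt : Y < pvFct (m + 1) := Int.emod_lt_of_pos _ hF
  have hYle : Y ≤ X := by
    have h := Int.ediv_add_emod X (pvFct (m + 1))
    have hq0 : 0 ≤ X / pvFct (m + 1) := Int.ediv_nonneg hX0 (le_of_lt hF)
    nlinarith
  have hmod : (rank - Y) % pvFct (m + 2) = X - Y := by
    have h1 : (rank - Y) % pvFct (m + 2) = (X - Y) % pvFct (m + 2) := by
      conv_lhs => rw [Int.sub_emod]
      conv_rhs => rw [Int.sub_emod]
      rw [Int.emod_emod_of_dvd _ dvd_rfl]
    rw [h1, Int.emod_eq_of_lt (by omega) (by omega)]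
  rw [hmod]
  have hq : X - Y = pvFct (m + 1) * (X / pvFct (m + 1)) := by
    have := Int.ediv_add_emod X (pvFct (m + 1))
    omega
  rw [hq, Int.mul_ediv_cancel_left _ (by omega)]
  rfl

theorem pv_rank_step (rank : Int) (m : Nat) :
    (rank - rank % pvFct (m + 1)) - pvDg rank (m + 1) * pvFct (m + 1)
      = rank - rank % pvFct (m + 2) := by
  have hF : 0 < pvFct (m + 1) := pvFct_pos _
  have hdvd : pvFct (m + 1) ∣ pvFct (m + 2) := by
    rw [pvFct_succ (m + 1)]; exact dvd_mul_right _ _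
  have hYX : (rank % pvFct (m + 2)) % pvFct (m + 1) = rank % pvFct (m + 1) :=
    Int.emod_emod_of_dvd _ hdvd
  have hq := Int.ediv_add_emod (rank % pvFct (m + 2)) (pvFct (m + 1))
  show (rank - rank % pvFct (m + 1))
      - (rank % pvFct (m + 2)) / pvFct (m + 1) * pvFct (m + 1)
    = rank - rank % pvFct (m + 2)
  linarith [hq, hYX]

theorem pv_A_inv (n rank : Int) (hn : 1 ≤ n) :
    ∀ (m : Nat), (m : Int) ≤ n - 1 →
      (PySem.List.pyRange 1 ((m : Int) + 1) 1).foldl (pvAStepL n)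
          (rank, List.replicate (n.toNat - 1) 0 ++ [1])
        = (rank - rank % pvFct (m + 1),
           List.replicate (n.toNat - 1 - m) (0 : Int) ++ pvG (pvDs rank m)) := by
  intro m
  induction m with
  | zero =>
    intro _
    simp [PySem.List.pyRange_one_eq_nil, pvFct, pvDs, pvG, Nat.factorial]
  | succ m ih =>
    intro hm
    have hm' : (m : Int) ≤ n - 1 := by push_cast at hm ⊢; omega
    have hsplit : PySem.List.pyRange 1 (((m + 1 : Nat) : Int) + 1) 1
        = PySem.List.pyRange 1 ((m : Int) + 1) 1 ++ [(m : Int) + 1] := by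
      have : (((m + 1 : Nat) : Int) + 1) = ((m : Int) + 1) + 1 := by push_cast; ring
      rw [this, PySem.List.pyRange_one_succ_right (by omega)]
    rw [hsplit, List.foldl_append, ih hm']
    simp only [List.foldl_cons, List.foldl_nil]
    -- one application of the loop body at j = m+1
    unfold pvAStepL
    simp only
    have hjfac : pyFactorial ((m : Int) + 1) = pvFct (m + 1) := by
      have : ((m : Int) + 1) = ((m + 1 : Nat) : Int) := by push_cast; ring
      rw [this, pyFactorial_natCast]
    rw [hjfac, pv_digit_step rank m]
    set d := pvDg rank (m + 1) with hd
    simp only [Prod.mk.injEq]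
    refine ⟨pv_rank_step rank m, ?_⟩
    have hK : m + 2 ≤ n.toNat := by
      have := hm
      push_cast at this
      omega
    set K := n.toNat - 2 - m with hKdef
    have h1 : n.toNat - 1 - m = K + 1 := by omega
    have hidx : n - ((m : Int) + 1) - 1 = ((K : Nat) : Int) := by push_cast; omega
    rw [h1, hidx, PySem.List.pySetD_natCast, pv_set_mid]
    have hpre : (d + 1) :: pvG (pvDs rank m) = [d + 1] ++ pvG (pvDs rank m) := rfl
    rw [hpre, ← List.append_assoc]
    have hprelen : (((List.replicate K (0:Int) ++ [d + 1]).length : Nat) : Int) = (K : Int) + 1 := by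
      simp
    have hstart : n - ((m : Int) + 1) = (((List.replicate K (0:Int) ++ [d + 1]).length : Nat) : Int) := by
      rw [hprelen]; push_cast; omega
    have hend : n = (((List.replicate K (0:Int) ++ [d + 1]).length : Nat) : Int)
        + (((pvG (pvDs rank m)).length : Nat) : Int) := by
      rw [hprelen, length_pvG, length_pvDs]; push_cast; omega
    conv_lhs => rw [hstart, hend]
    rw [pv_inner_fold]
    have h2 : n.toNat - 1 - (m + 1) = K := by omega
    rw [h2, List.append_assoc]
    congr 1

theorem pv_A_eq (n rank : Int) (hn : 1 ≤ n) :
    perm_lex_unrank n rank = pvG (pvDs rank (n.toNat - 1)) := by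
  unfold perm_lex_unrank
  rw [(pv_A_bridge n (PySem.List.pyRange 1 n 1) rank _).2, pvArrSetD_eq, List.toList_toArray]
  have hinit : PySem.List.pySetD ((PySem.List.pyRange 0 n 1).map (fun _ => (0:Int))) (-1) 1
      = List.replicate (n.toNat - 1) 0 ++ [1] := by
    have hmap : (PySem.List.pyRange 0 n 1).map (fun _ => (0:Int)) = List.replicate n.toNat 0 := by
      rw [List.map_const']
      congr 1
      rw [PySem.List.length_pyRange_one]
      omega
    rw [hmap]
    have hlen : (List.replicate n.toNat (0:Int)).length = n.toNat := by simp
    simp only [PySem.List.pySetD, PySem.List.pySet?, PySem.List.pyIdx?, hlen]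
    rw [if_neg (by omega), if_pos (by omega)]
    simp only [Option.map_some, Option.getD_some]
    have h1 : n.toNat - (-(-1:Int)).toNat = n.toNat - 1 := by norm_num
    rw [h1]
    have h2 := pv_set_mid (n.toNat - 1) ([] : List Int) 1
    simp only [List.append_nil] at h2
    have h3 : n.toNat - 1 + 1 = n.toNat := by omega
    rw [h3] at h2
    exact h2
  rw [hinit]
  have hrange : PySem.List.pyRange 1 n 1
      = PySem.List.pyRange 1 (((n.toNat - 1 : Nat) : Int) + 1) 1 := by
    congr 1; push_cast; omega
  rw [hrange, pv_A_inv n rank hn (n.toNat - 1) (by push_cast; omega)]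
  simp

-- B-side characterisation --------------------------------------------------

def pvE (r0 : Int) (j : Nat) : Int := (r0 / pvFct (j - 1)) % (j : Int)

def pvRevE (r0 : Int) : Nat → List Int
  | 0 => []
  | 1 => [0]
  | m + 2 => pvE r0 (m + 2) :: pvRevE r0 (m + 1)

theorem pvRevE_succ (r0 : Int) (m : Nat) (hm : 1 ≤ m) :
    pvRevE r0 (m + 1) = pvE r0 (m + 1) :: pvRevE r0 m := by
  obtain ⟨k, rfl⟩ : ∃ k, m = k + 1 := ⟨m - 1, by omega⟩
  rfl

theorem pv_B_digits (n r0 : Int) (hn : 1 ≤ n) (hr : 0 ≤ r0) :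
    ∀ m : Nat, 1 ≤ m → (m : Int) ≤ n →
      (PySem.List.pyRange 2 ((m : Int) + 1) 1).foldl (permBDigitStep n)
          (r0, List.replicate n.toNat 0)
        = (r0 / pvFct m, List.replicate (n.toNat - m) (0 : Int) ++ pvRevE r0 m) := by
  intro m
  induction m with
  | zero => intro h; omega
  | succ m ih =>
    intro _ hm
    by_cases hm1 : m = 0
    · subst hm1
      have h1 : PySem.List.pyRange 2 (((0 + 1 : Nat) : Int) + 1) 1 = [] := by
        rw [PySem.List.pyRange_one_eq_nil (by norm_num)]
      rw [h1]
      simp only [List.foldl_nil, Prod.mk.injEq]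
      constructor
      · unfold pvFct
        norm_num [Nat.factorial]
      · have h2 : n.toNat = (n.toNat - 1) + 1 := by omega
        rw [h2, List.replicate_succ']
        rfl
    · have hm2 : 1 ≤ m := by omega
      have hsplit : PySem.List.pyRange 2 (((m + 1 : Nat) : Int) + 1) 1
          = PySem.List.pyRange 2 ((m : Int) + 1) 1 ++ [(m : Int) + 1] := by
        have h : (((m + 1 : Nat) : Int) + 1) = ((m : Int) + 1) + 1 := by push_cast; ring
        rw [h, PySem.List.pyRange_one_succ_right (by push_cast; omega)]
      rw [hsplit, List.foldl_append, ih hm2 (by push_cast at hm ⊢; omega)]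
      simp only [List.foldl_cons, List.foldl_nil]
      unfold permBDigitStep
      simp only
      have hFm : 0 < pvFct m := pvFct_pos m
      have hdiv : PySem.Int.floordiv (r0 / pvFct m) ((m : Int) + 1) = r0 / pvFct (m + 1) := by
        rw [PySem.Int.floordiv_eq_ediv_of_pos (by omega : (0 : Int) < (m : Int) + 1)]
        rw [Int.ediv_ediv_of_nonneg (le_of_lt hFm), ← pvFct_succ]
      have hmod : PySem.Int.mod (r0 / pvFct m) ((m : Int) + 1) = pvE r0 (m + 1) := by
        rw [PySem.Int.mod_eq_emod_of_pos (by omega : (0 : Int) < (m : Int) + 1)]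
        unfold pvE
        norm_num
      rw [hdiv, hmod]
      simp only [Prod.mk.injEq]
      refine ⟨trivial, ?_⟩
      have hK : m + 1 ≤ n.toNat := by
        have := hm
        push_cast at this
        omega
      have hidx : n - ((m : Int) + 1) = ((n.toNat - (m + 1) : Nat) : Int) := by push_cast; omega
      have h1 : n.toNat - m = (n.toNat - (m + 1)) + 1 := by omega
      rw [hidx, PySem.List.pySetD_natCast, h1, pv_set_mid, pvRevE_succ r0 m hm2]

-- the pop loop, abstracted

def pvPopL : List Int → List Int → List Int
  | _, [] => []
  | avail, d :: ds =>
    match PySem.List.pop? avail d with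
    | some (v, rest) => v :: pvPopL rest ds
    | none => pvPopL avail ds

theorem pv_foldl_pop (ds : List Int) :
    ∀ (avail acc : List Int),
      (ds.foldl permBPopStep (avail, acc)).2 = acc ++ pvPopL avail ds := by
  induction ds with
  | nil => intro avail acc; simp [pvPopL]
  | cons d ds ih =>
    intro avail acc
    simp only [List.foldl_cons]
    cases h : PySem.List.pop? avail d with
    | none => simp [permBPopStep, pvPopL, h, ih]
    | some vr =>
      obtain ⟨v, rest⟩ := vr
      simp [permBPopStep, pvPopL, h, ih]

def pvFits : List Int → Nat → Prop
  | [], _ => True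
  | d :: ds, L => 0 ≤ d ∧ d < (L : Int) ∧ pvFits ds (L - 1)

theorem pv_popL_map (g : Int → Int) :
    ∀ (ds avail : List Int), pvFits ds avail.length →
      pvPopL (avail.map g) ds = (pvPopL avail ds).map g := by
  intro ds
  induction ds with
  | nil => intro avail _; simp [pvPopL]
  | cons d ds ih =>
    intro avail hf
    obtain ⟨h0, h1, h2⟩ := hf
    have hlt : d.toNat < avail.length := by omega
    have hd : d = ((d.toNat : Nat) : Int) := by omega
    have hp := PySem.List.pop?_natCast avail d.toNat hlt
    have hp' := PySem.List.pop?_natCast (avail.map g) d.toNat (by simpa using hlt)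
    rw [pvPopL, pvPopL, hd, hp, hp']
    simp only [List.getElem_map, List.eraseIdx_map, List.map_cons]
    congr 1
    apply ih
    rw [List.length_eraseIdx_of_lt hlt]
    exact h2

theorem pv_eraseIdx_range (M : Nat) (d : Int) (h0 : 0 ≤ d) (h1 : d ≤ (M : Int)) :
    (PySem.List.pyRange 1 ((M : Int) + 2) 1).eraseIdx d.toNat
      = (PySem.List.pyRange 1 ((M : Int) + 1) 1).map (pvBump d) := by
  have hsplitL : PySem.List.pyRange 1 ((M : Int) + 2) 1
      = PySem.List.pyRange 1 (d + 1) 1 ++ PySem.List.pyRange (d + 1) ((M : Int) + 2) 1 :=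
    PySem.List.pyRange_one_append 1 (d + 1) _ (by omega) (by omega)
  have hlen1 : (PySem.List.pyRange 1 (d + 1) 1).length = d.toNat := by
    rw [PySem.List.length_pyRange_one]; omega
  have hcons : PySem.List.pyRange (d + 1) ((M : Int) + 2) 1
      = (d + 1) :: PySem.List.pyRange (d + 2) ((M : Int) + 2) 1 := by
    rw [PySem.List.pyRange_one_cons (by omega)]
    have h : d + 1 + 1 = d + 2 := by ring
    rw [h]
  have hsplitR : PySem.List.pyRange 1 ((M : Int) + 1) 1
      = PySem.List.pyRange 1 (d + 1) 1 ++ PySem.List.pyRange (d + 1) ((M : Int) + 1) 1 :=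
    PySem.List.pyRange_one_append 1 (d + 1) _ (by omega) (by omega)
  have hmap1 : (PySem.List.pyRange 1 (d + 1) 1).map (pvBump d)
      = PySem.List.pyRange 1 (d + 1) 1 := by
    rw [List.map_congr_left (g := id), List.map_id]
    intro x hx
    rw [PySem.List.mem_pyRange_one] at hx
    simp only [pvBump, id]
    rw [if_neg (by omega)]
  have hmap2 : (PySem.List.pyRange (d + 1) ((M : Int) + 1) 1).map (pvBump d)
      = PySem.List.pyRange (d + 2) ((M : Int) + 2) 1 := by
    rw [PySem.List.pyRange_one (d + 1), PySem.List.pyRange_one (d + 2), List.map_map]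
    have hl : ((M : Int) + 1 - (d + 1)).toNat = ((M : Int) + 2 - (d + 2)).toNat := by omega
    rw [hl]
    apply List.map_congr_left
    intro k _
    simp only [Function.comp, pvBump]
    rw [if_pos (by omega)]
    ring
  rw [hsplitL, hcons, ← hlen1, List.eraseIdx_append_of_length_le (le_refl _)]
  simp only [Nat.sub_self, List.eraseIdx_cons_zero]
  rw [hsplitR, List.map_append, hmap1, hmap2]

theorem pv_popL_G :
    ∀ ds : List Int, pvFits (ds ++ [0]) (ds.length + 1) →
      pvPopL (PySem.List.pyRange 1 ((ds.length : Int) + 2) 1) (ds ++ [0]) = pvG ds := by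
  intro ds
  induction ds with
  | nil => intro _; decide
  | cons d ds ih =>
    intro hf
    obtain ⟨h0, h1, h2⟩ := hf
    obtain ⟨dk, rfl⟩ : ∃ k : Nat, d = (k : Int) := ⟨d.toNat, by omega⟩
    have h1' : dk < ds.length + 2 := by
      have h := h1; push_cast [List.length_cons] at h; omega
    have hlen : (PySem.List.pyRange 1 ((((dk : Int) :: ds).length : Int) + 2) 1).length
        = ds.length + 2 := by
      rw [PySem.List.length_pyRange_one]; push_cast [List.length_cons]; omega
    rw [List.cons_append, pvPopL,
        PySem.List.pop?_natCast _ dk (by rw [hlen]; exact h1')]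
    simp only
    rw [PySem.List.getElem_pyRange_one]
    have hM : ((((dk : Int) :: ds).length : Int) + 2) = (((ds.length + 1 : Nat) : Int) + 2) := by
      push_cast [List.length_cons]; ring
    have herase := pv_eraseIdx_range (ds.length + 1) (dk : Int) (by positivity)
        (by push_cast; omega)
    simp only [Int.toNat_natCast] at herase
    rw [hM, herase]
    have hfits : pvFits (ds ++ [0])
        ((PySem.List.pyRange 1 (((ds.length + 1 : Nat) : Int) + 1) 1).length) := by
      rw [PySem.List.length_pyRange_one]
      have hl : (((ds.length + 1 : Nat) : Int) + 1 - 1).toNat = ds.length + 1 := by omega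
      rw [hl]
      exact h2
    rw [pv_popL_map _ _ _ hfits]
    have harg : (((ds.length + 1 : Nat) : Int) + 1) = ((ds.length : Int) + 2) := by
      push_cast; ring
    have hrange : PySem.List.pyRange 1 (((ds.length + 1 : Nat) : Int) + 1) 1
        = PySem.List.pyRange 1 ((ds.length : Int) + 2) 1 := by
      rw [harg]
    rw [hrange, ih h2]
    rw [pvG]
    congr 1
    omega

theorem pv_fct_dvd (a b : Nat) (h : a ≤ b) : pvFct a ∣ pvFct b := by
  unfold pvFct; exact_mod_cast Nat.factorial_dvd_factorial h

theorem pvE_eq_dg (rank : Int) (n k : Nat) (h : k + 2 ≤ n) :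
    pvE (rank % pvFct n) (k + 2) = pvDg rank (k + 1) := by
  have hF : 0 < pvFct (k + 1) := pvFct_pos _
  have hG : 0 < pvFct (k + 2) := pvFct_pos _
  have hd : rank % pvFct n % pvFct (k + 2) = rank % pvFct (k + 2) :=
    Int.emod_emod_of_dvd _ (pv_fct_dvd _ _ h)
  unfold pvE pvDg
  set a := rank % pvFct n with ha
  set s := a % pvFct (k + 2) with hs
  set q := a / pvFct (k + 2) with hq
  have hs0 : 0 ≤ s := Int.emod_nonneg _ (by omega)
  have hslt : s < pvFct (k + 2) := Int.emod_lt_of_pos _ hG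
  have hGF : pvFct (k + 2) = pvFct (k + 1) * ((k : Int) + 2) := by
    rw [pvFct_succ (k + 1)]; push_cast; ring
  have haqs : a = s + pvFct (k + 1) * (((k : Int) + 2) * q) := by
    have h1 : pvFct (k + 2) * q + s = a := Int.ediv_add_emod a (pvFct (k + 2))
    rw [hGF] at h1
    linear_combination -h1
  have hstep : a / pvFct (k + 2 - 1) = s / pvFct (k + 1) + ((k : Int) + 2) * q := by
    have hk1 : k + 2 - 1 = k + 1 := rfl
    rw [hk1]
    conv_lhs => rw [haqs]
    exact Int.add_mul_ediv_left _ _ (ne_of_gt hF)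
  rw [hstep]
  have hc : ((k + 2 : Nat) : Int) = (k : Int) + 2 := by push_cast; ring
  rw [hc, Int.add_mul_emod_self_left]
  have hsF0 : 0 ≤ s / pvFct (k + 1) := Int.ediv_nonneg hs0 (le_of_lt hF)
  have hsFlt : s / pvFct (k + 1) < (k : Int) + 2 := by
    rw [Int.ediv_lt_iff_lt_mul hF]
    rw [hGF] at hslt
    linarith [hslt]
  rw [Int.emod_eq_of_lt hsF0 hsFlt, hd]

theorem pv_revE_eq_ds (rank : Int) (n : Nat) :
    ∀ m : Nat, 1 ≤ m → m ≤ n →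
      pvRevE (rank % pvFct n) m = pvDs rank (m - 1) ++ [0] := by
  intro m
  induction m with
  | zero => intro h; omega
  | succ m ih =>
    intro _ hm
    by_cases hm1 : m = 0
    · subst hm1; rfl
    · have hm2 : 1 ≤ m := by omega
      rw [pvRevE_succ _ m hm2, ih hm2 (by omega)]
      obtain ⟨k, rfl⟩ : ∃ k, m = k + 1 := ⟨m - 1, by omega⟩
      rw [pvE_eq_dg rank n k (by omega)]
      rfl

theorem pv_dg_nonneg (rank : Int) (k : Nat) : 0 ≤ pvDg rank k :=
  Int.ediv_nonneg (Int.emod_nonneg _ (ne_of_gt (pvFct_pos _))) (le_of_lt (pvFct_pos _))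

theorem pv_dg_lt (rank : Int) (k : Nat) : pvDg rank k < (k : Int) + 1 := by
  unfold pvDg
  rw [Int.ediv_lt_iff_lt_mul (pvFct_pos _)]
  have h1 : rank % pvFct (k + 1) < pvFct (k + 1) := Int.emod_lt_of_pos _ (pvFct_pos _)
  rw [pvFct_succ k, mul_comm] at h1
  exact h1

theorem pv_fits_ds (rank : Int) : ∀ m : Nat, pvFits (pvDs rank m ++ [0]) (m + 1) := by
  intro m
  induction m with
  | zero => exact ⟨le_refl 0, by norm_num, trivial⟩
  | succ m ih =>
    refine ⟨pv_dg_nonneg _ _, ?_, ?_⟩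
    · have h := pv_dg_lt rank (m + 1)
      push_cast at h ⊢
      omega
    · exact ih

theorem pv_B_eq (n rank : Int) (hn : 1 ≤ n) :
    perm_lex_unrank_alt n rank = pvG (pvDs rank (n.toNat - 1)) := by
  unfold perm_lex_unrank_alt
  have hfac : pyFactorial n = pvFct n.toNat := rfl
  have hFpos : 0 < pvFct n.toNat := pvFct_pos _
  have hmod : PySem.Int.mod rank (pyFactorial n) = rank % pvFct n.toNat := by
    rw [hfac, PySem.Int.mod_eq_emod_of_pos hFpos]
  simp only [hmod]
  have hr0 : 0 ≤ rank % pvFct n.toNat := Int.emod_nonneg _ (by omega)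
  have hrange2 : PySem.List.pyRange 2 (n + 1) 1
      = PySem.List.pyRange 2 ((n.toNat : Int) + 1) 1 := by
    congr 1; omega
  rw [hrange2, pv_B_digits n _ hn hr0 n.toNat (by omega) (by omega)]
  simp only
  rw [pv_revE_eq_ds rank n.toNat n.toNat (by omega) (le_refl _)]
  simp only [Nat.sub_self, List.replicate_zero, List.nil_append]
  rw [pv_foldl_pop, List.nil_append]
  have hr : PySem.List.pyRange 1 (n + 1) 1
      = PySem.List.pyRange 1 ((((pvDs rank (n.toNat - 1)).length : Nat) : Int) + 2) 1 := by
    congr 1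
    rw [length_pvDs]
    push_cast
    omega
  rw [hr]
  apply pv_popL_G
  rw [length_pvDs]
  exact pv_fits_ds rank _

-- ===== VERDICT (by name: the statement is the Claim_ definition above) =====
theorem perm_lex_unrank_spec : Claim_equal_perm_lex_unrank := by
  intro n rank _ hpre
  have hn : 1 ≤ n := hpre
  unfold Spec_perm_lex_unrank
  rw [pv_A_eq n rank hn, pv_B_eq n rank hn]
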